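-- pv_equiv track=rewrite | github.com/wjdgustj20/SW-Academy | coding_test/thanos_sort1/thanos_sort1.py | stalin
-- ===== SOURCE A (Python) =====
-- def stalin(arr):
--     change = True
--
--     while (change):
--         change = False
--         for i, a in enumerate(arr):
--             if i >= len(arr) - 1:
--                 break
--             if a > arr[i+1]:
--                 arr[i] = arr[i] // 2
--                 change = True
--
--     return arr
-- ===== SOURCE B (Python) =====
-- def stalin(arr):
--     # Single right-to-left pass: once the suffix is final, arr[i] just needs
--     # halving until it is <= its (final) right neighbour.  Mutates arr in
--     # place and returns it, like A.
--     for i in range(len(arr) - 2, -1, -1):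
--         a = arr[i]
--         while a > arr[i + 1]:
--             a //= 2
--         arr[i] = a
--     return arr
-- ===== Notes on version B (the rewrite author's own statement) =====
-- stated objective: faster
-- what changed: Replaces A's repeated full left-to-right sweeps (looping until a sweep makes no change) by a single right-to-left pass that halves each element directly against its already-final right neighbour.
import Mathlib
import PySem

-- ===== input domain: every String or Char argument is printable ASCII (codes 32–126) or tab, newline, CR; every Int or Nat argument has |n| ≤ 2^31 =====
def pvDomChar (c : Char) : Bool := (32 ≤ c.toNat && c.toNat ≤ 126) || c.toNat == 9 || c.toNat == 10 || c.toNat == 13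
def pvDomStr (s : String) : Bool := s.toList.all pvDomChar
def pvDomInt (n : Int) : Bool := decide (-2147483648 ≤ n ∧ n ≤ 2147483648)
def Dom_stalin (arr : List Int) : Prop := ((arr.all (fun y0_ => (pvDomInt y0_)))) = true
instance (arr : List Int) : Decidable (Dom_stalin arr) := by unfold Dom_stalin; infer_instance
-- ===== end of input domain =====

-- B halves each element in ONE right-to-left pass instead of A's repeated full sweeps;
-- both A and B mutate the caller's list in place and return it, with identical final contents.

-- ===== PORT A =====
-- one left-to-right sweep of A's while-body: (new array, change flag); faithful because
-- Python's loop at index i only ever modifies arr[i], never a value it still has to read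
def passA : List Int → List Int × Bool
  | [] => ([], false)
  | [a] => ([a], false)
  | a :: b :: t =>
    let r := passA (b :: t)
    if a > b then (PySem.Int.floordiv a 2 :: r.1, true) else (a :: r.1, r.2)

-- the 'while change' loop; the fuel only makes it total, and is provably sufficient on Pre_
def stalinGo : Nat → List Int → List Int
  | 0, arr => arr
  | k + 1, arr =>
    let r := passA arr
    if r.2 then stalinGo k r.1 else r.1

def stalin (arr : List Int) : List Int :=
  stalinGo ((arr.map Int.toNat).sum + 1) arr

-- ===== PORT B =====
-- the 'while a > arr[i+1]: a //= 2' loop; fuel (a.toNat + 1) only makes it total, and is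
-- provably sufficient whenever the bound b is nonnegative (the only case reached on Pre_)
def reduceFuel : Nat → Int → Int → Int
  | 0, a, _ => a
  | k + 1, a, b => if a > b then reduceFuel k (PySem.Int.floordiv a 2) b else a

def reduceB (a b : Int) : Int := reduceFuel (a.toNat + 1) a b

-- Source B's index loop runs right-to-left with the suffix already final: structural recursion
-- that finalizes the suffix, then reduces the current element against the suffix head
def stalin_alt : List Int → List Int
  | [] => []
  | a :: t =>
    let r := stalin_alt t
    match r with
    | [] => [a]
    | b :: _ => reduceB a b :: r

-- ===== PRECONDITION & SPEC =====
-- Pre_ excludes exactly the inputs on which A never returns: whenever some element exceeds a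
-- NEGATIVE right neighbour, repeated floor-halving can never sink below it (it stalls at 0 or
-- -1), so A's while loop runs forever.  On such inputs B also loops forever in Python.
def Pre_stalin (arr : List Int) : Prop :=
  List.IsChain (fun a b : Int => b < 0 → a ≤ b) arr

instance (arr : List Int) : Decidable (Pre_stalin arr) := by unfold Pre_stalin; infer_instance

def pvWitness_stalin : List Int := [-7, -5, 20, 3, 16, 2]

def Spec_stalin (arr : List Int) (out : List Int) : Prop := out = stalin_alt arr
instance (arr : List Int) (out : List Int) : Decidable (Spec_stalin arr out) := by unfold Spec_stalin; infer_instance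

-- ===== CLAIM (what is proved, stated in full; the proofs are below) =====
def Claim_equal_stalin : Prop := ∀ (arr : List Int), Dom_stalin arr → Pre_stalin arr → Spec_stalin arr (stalin arr)

-- ===== LEMMAS AND PROOFS =====

theorem halve_eq (a : Int) : PySem.Int.floordiv a 2 = a / 2 :=
  PySem.Int.floordiv_eq_ediv_of_pos (by norm_num)

-- reduceFuel does not depend on the fuel once it exceeds a.toNat, provided 0 ≤ b
theorem reduceFuel_fuel_irrel (b : Int) (hb : 0 ≤ b) :
    ∀ n : Nat, ∀ a : Int, ∀ f₁ f₂ : Nat, a.toNat ≤ n → a.toNat < f₁ → a.toNat < f₂ →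
      reduceFuel f₁ a b = reduceFuel f₂ a b := by
  intro n
  induction n with
  | zero =>
    intro a f₁ f₂ hn h1 h2
    match f₁, f₂ with
    | k₁ + 1, k₂ + 1 =>
      simp only [reduceFuel]
      have : ¬ a > b := by omega
      simp [this]
  | succ m ih =>
    intro a f₁ f₂ hn h1 h2
    match f₁, f₂ with
    | k₁ + 1, k₂ + 1 =>
      simp only [reduceFuel]
      by_cases hab : a > b
      · simp only [hab, if_pos]
        have hh : (PySem.Int.floordiv a 2).toNat < a.toNat := by
          rw [halve_eq]; omega
        exact ih (PySem.Int.floordiv a 2) k₁ k₂ (by omega) (by omega) (by omega)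
      · simp [hab]

theorem reduce_le {a b : Int} (h : a ≤ b) : reduceB a b = a := by
  simp only [reduceB, reduceFuel]
  have : ¬ a > b := by omega
  simp [this]

theorem reduce_gt {a b : Int} (hb : 0 ≤ b) (h : b < a) :
    reduceB a b = reduceB (PySem.Int.floordiv a 2) b := by
  have hh : (PySem.Int.floordiv a 2).toNat < a.toNat := by rw [halve_eq]; omega
  have h1 : reduceB a b = reduceFuel a.toNat (PySem.Int.floordiv a 2) b := by
    have h0 : reduceFuel (a.toNat + 1) a b =
        if a > b then reduceFuel a.toNat (PySem.Int.floordiv a 2) b else a := rfl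
    rw [reduceB, h0, if_pos (by omega : a > b)]
  rw [h1, reduceB]
  exact reduceFuel_fuel_irrel b hb a.toNat (PySem.Int.floordiv a 2) _ _ (by omega) (by omega) (by omega)

-- on a nonnegative bound the reduced value lands in [0, b]
theorem reduce_bounds {b : Int} (hb : 0 ≤ b) :
    ∀ n : Nat, ∀ a : Int, a.toNat ≤ n → b < a → 0 ≤ reduceB a b ∧ reduceB a b ≤ b := by
  intro n
  induction n with
  | zero => intro a hn h; omega
  | succ m ih =>
    intro a hn h
    rw [reduce_gt hb h]
    have hb' : 0 ≤ PySem.Int.floordiv a 2 ∧ (PySem.Int.floordiv a 2).toNat < a.toNat := by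
      rw [halve_eq]; omega
    by_cases hle : PySem.Int.floordiv a 2 ≤ b
    · rw [reduce_le hle]; omega
    · exact ih (PySem.Int.floordiv a 2) (by omega) (by omega)

theorem alt_single (a : Int) : stalin_alt [a] = [a] := rfl

theorem alt_cons (a : Int) (t : List Int) (x : Int) (r : List Int)
    (h : stalin_alt t = x :: r) : stalin_alt (a :: t) = reduceB a x :: x :: r := by
  simp only [stalin_alt, h]

theorem alt_ne_nil : ∀ t a, stalin_alt (a :: t) ≠ [] := by
  intro t a
  match t with
  | [] => simp [alt_single]
  | b :: t' =>
    rcases h : stalin_alt (b :: t') with _ | ⟨x, r⟩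
    · exact absurd h (alt_ne_nil t' b)
    · rw [alt_cons a _ x r h]; simp

-- head invariant of stalin_alt under Pre_: the head only goes down, and a negative head is unchanged
theorem alt_head_inv : ∀ t a, Pre_stalin (a :: t) →
    ∀ h, (stalin_alt (a :: t)).head? = some h → h ≤ a ∧ (h < 0 → h = a) := by
  intro t
  match t with
  | [] => intro a _ h hh; rw [alt_single] at hh; simp at hh; omega
  | b :: t' =>
    intro a hpre h hh
    have hpre' : Pre_stalin (b :: t') := (List.isChain_cons_cons.mp hpre).2
    have hR : b < 0 → a ≤ b := (List.isChain_cons_cons.mp hpre).1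
    rcases hx : stalin_alt (b :: t') with _ | ⟨x, r⟩
    · exact absurd hx (alt_ne_nil t' b)
    · have hxinv := alt_head_inv t' b hpre' x (by rw [hx]; rfl)
      rw [alt_cons a _ x r hx] at hh
      simp only [List.head?_cons, Option.some.injEq] at hh
      subst hh
      by_cases hab : a ≤ x
      · rw [reduce_le hab]; omega
      · have hx0 : 0 ≤ x := by
          by_contra hneg
          have := hxinv.2 (by omega)
          omega
        have := reduce_bounds hx0 a.toNat a (le_refl _) (by omega)
        exact ⟨by omega, by omega⟩

-- one sweep of A preserves the final (right-to-left) result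
theorem pass_preserves_alt : ∀ xs, Pre_stalin xs → stalin_alt ((passA xs).1) = stalin_alt xs := by
  intro xs
  match xs with
  | [] => intro _; rfl
  | [a] => intro _; rfl
  | a :: b :: t =>
    intro hpre
    have hpre' : Pre_stalin (b :: t) := (List.isChain_cons_cons.mp hpre).2
    have hR : b < 0 → a ≤ b := (List.isChain_cons_cons.mp hpre).1
    have ih := pass_preserves_alt (b :: t) hpre'
    rcases hp : passA (b :: t) with ⟨r, c⟩
    rw [hp] at ih
    dsimp only at ih
    rcases hx : stalin_alt (b :: t) with _ | ⟨x, rr⟩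
    · exact absurd hx (alt_ne_nil t b)
    rw [hx] at ih
    simp only [passA, hp]
    by_cases hab : a > b
    · rw [if_pos hab]
      dsimp only
      rw [alt_cons _ r x rr ih, alt_cons a (b :: t) x rr hx]
      have hxinv := alt_head_inv t b hpre' x (by rw [hx]; rfl)
      have hx0 : 0 ≤ x := by
        by_contra hneg
        have := hxinv.2 (by omega)
        omega
      rw [← reduce_gt hx0 (by omega)]
    · rw [if_neg hab]
      dsimp only
      rw [alt_cons _ r x rr ih, alt_cons a (b :: t) x rr hx]

-- one sweep of A preserves Pre_
theorem pass_preserves_pre : ∀ xs, Pre_stalin xs → Pre_stalin ((passA xs).1) := by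
  intro xs
  match xs with
  | [] => intro _; exact List.IsChain.nil
  | [a] => intro _; simp only [passA]; exact List.IsChain.singleton a
  | a :: b :: t =>
    intro hpre
    have hpre' : Pre_stalin (b :: t) := (List.isChain_cons_cons.mp hpre).2
    have hR : b < 0 → a ≤ b := (List.isChain_cons_cons.mp hpre).1
    have ih := pass_preserves_pre (b :: t) hpre'
    rcases hp : passA (b :: t) with ⟨r, c⟩
    rw [hp] at ih
    dsimp only at ih
    -- the head b' of r: b' < 0 forces b' = b and b < 0 (a halved value is nonnegative under Pre_)
    have hhead : ∀ b' rr, r = b' :: rr → b' < 0 → b' = b ∧ b < 0 := by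
      intro b' rr hr hb'
      rcases t with _ | ⟨c', t'⟩
      · simp only [passA] at hp; cases hp; cases hr; exact ⟨rfl, hb'⟩
      · have hRc : c' < 0 → b ≤ c' := (List.isChain_cons_cons.mp hpre').1
        simp only [passA] at hp
        by_cases h1 : b > c'
        · simp only [h1, if_pos] at hp
          cases hp
          cases hr
          have hc0 : 0 ≤ c' := by by_contra h; have := hRc (by omega); omega
          have : 0 ≤ PySem.Int.floordiv b 2 := by rw [halve_eq]; omega
          omega
        · rw [if_neg h1] at hp
          cases hp
          cases hr
          exact ⟨rfl, hb'⟩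
    simp only [passA, hp]
    rcases hr : r with _ | ⟨b', rr⟩
    · by_cases hab : a > b <;> simp only [hab, if_pos] <;> exact List.IsChain.singleton _
    rw [hr] at ih
    by_cases hab : a > b
    · simp only [hab, if_pos]
      refine List.isChain_cons_cons.mpr ⟨?_, ih⟩
      intro hb'
      rcases hhead b' rr hr hb' with ⟨rfl, hbneg⟩
      have : a ≤ b' := hR hbneg
      omega
    · rw [if_neg hab]
      refine List.isChain_cons_cons.mpr ⟨?_, ih⟩
      intro hb'
      rcases hhead b' rr hr hb' with ⟨rfl, hbneg⟩
      exact hR hbneg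

def muS (xs : List Int) : Nat := (xs.map Int.toNat).sum

theorem passA_cons_cons (a b : Int) (t : List Int) :
    passA (a :: b :: t) = if a > b then (PySem.Int.floordiv a 2 :: (passA (b :: t)).1, true)
      else (a :: (passA (b :: t)).1, (passA (b :: t)).2) := rfl

theorem pass_mu_le : ∀ xs, muS ((passA xs).1) ≤ muS xs := by
  intro xs
  match xs with
  | [] => exact le_refl _
  | [a] => exact le_refl _
  | a :: b :: t =>
    have ih := pass_mu_le (b :: t)
    rw [passA_cons_cons]
    by_cases hab : a > b
    · rw [if_pos hab]
      dsimp only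
      simp only [muS, List.map_cons, List.sum_cons] at ih ⊢
      have : (PySem.Int.floordiv a 2).toNat ≤ a.toNat := by rw [halve_eq]; omega
      omega
    · rw [if_neg hab]
      dsimp only
      simp only [muS, List.map_cons, List.sum_cons] at ih ⊢
      omega

theorem pass_mu_lt : ∀ xs, Pre_stalin xs → (passA xs).2 = true → muS ((passA xs).1) < muS xs := by
  intro xs
  match xs with
  | [] => intro _ h; simp [passA] at h
  | [a] => intro _ h; simp [passA] at h
  | a :: b :: t =>
    intro hpre hch
    have hpre' : Pre_stalin (b :: t) := (List.isChain_cons_cons.mp hpre).2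
    have hR : b < 0 → a ≤ b := (List.isChain_cons_cons.mp hpre).1
    rw [passA_cons_cons] at hch ⊢
    by_cases hab : a > b
    · rw [if_pos hab]
      dsimp only
      have hb0 : 0 ≤ b := by by_contra h; have := hR (by omega); omega
      have h1 : (PySem.Int.floordiv a 2).toNat < a.toNat := by rw [halve_eq]; omega
      have h2 := pass_mu_le (b :: t)
      simp only [muS, List.map_cons, List.sum_cons] at h2 ⊢
      omega
    · rw [if_neg hab] at hch ⊢
      dsimp only at hch ⊢
      have h3 := pass_mu_lt (b :: t) hpre' hch
      simp only [muS, List.map_cons, List.sum_cons] at h3 ⊢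
      omega

theorem pass_nochange : ∀ xs, (passA xs).2 = false →
    (passA xs).1 = xs ∧ List.IsChain (· ≤ ·) xs := by
  intro xs
  match xs with
  | [] => intro _; exact ⟨rfl, List.IsChain.nil⟩
  | [a] => intro _; exact ⟨rfl, List.IsChain.singleton _⟩
  | a :: b :: t =>
    intro hch
    rw [passA_cons_cons] at hch ⊢
    by_cases hab : a > b
    · rw [if_pos hab] at hch
      simp at hch
    · rw [if_neg hab] at hch ⊢
      dsimp only at hch ⊢
      have ih := pass_nochange (b :: t) hch
      exact ⟨by rw [ih.1], List.isChain_cons_cons.mpr ⟨by omega, ih.2⟩⟩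

theorem alt_sorted_id : ∀ xs, List.IsChain (· ≤ ·) xs → stalin_alt xs = xs := by
  intro xs
  match xs with
  | [] => intro _; rfl
  | [a] => intro _; rfl
  | a :: b :: t =>
    intro hs
    obtain ⟨hab, hs'⟩ := List.isChain_cons_cons.mp hs
    have ih := alt_sorted_id (b :: t) hs'
    rw [alt_cons a (b :: t) b t ih, reduce_le hab]

theorem go_eq_alt : ∀ fuel xs, Pre_stalin xs → muS xs < fuel → stalinGo fuel xs = stalin_alt xs := by
  intro fuel
  induction fuel with
  | zero => intro xs _ h; omega
  | succ k ih =>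
    intro xs hpre hmu
    have h0 : stalinGo (k + 1) xs =
        if (passA xs).2 then stalinGo k (passA xs).1 else (passA xs).1 := rfl
    rw [h0]
    by_cases hc : (passA xs).2 = true
    · rw [if_pos hc]
      have h1 := pass_preserves_pre xs hpre
      have h2 := pass_mu_lt xs hpre hc
      have h3 := pass_preserves_alt xs hpre
      rw [ih _ h1 (by omega), h3]
    · rw [if_neg hc]
      rw [Bool.not_eq_true] at hc
      have h4 := pass_nochange xs hc
      rw [h4.1, alt_sorted_id xs h4.2]

-- ===== VERDICT (by name: the statement is the Claim_ definition above) =====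
theorem stalin_spec : Claim_equal_stalin := by
  intro arr _ hpre
  unfold Spec_stalin stalin
  exact go_eq_alt _ arr hpre (by simp only [muS]; omega)
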